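-- pv_equiv track=rewrite | github.com/AlexDistill/Concierto | brand_preview.py | _generate_brand_beliefs
-- ===== SOURCE A (Python) =====
-- from typing import Dict, Any, List
--
-- def _generate_brand_beliefs(brand_spec: Dict[str, Any]) -> str:
--     """Generate brand beliefs statement"""
--     personality = brand_spec.get('personality', {})
--     traits = [t.lower() for t in personality.get('traits', [])]
--
--     beliefs = []
--     if any(trait in traits for trait in ['authentic', 'honest', 'genuine']):
--         beliefs.append("Authenticity creates deeper connections than perfection")
--     if any(trait in traits for trait in ['innovative', 'creative', 'forward']):
--         beliefs.append("Innovation flourishes when diverse perspectives collide")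
--     if any(trait in traits for trait in ['bold', 'confident', 'strong']):
--         beliefs.append("Bold action creates lasting change")
--     if any(trait in traits for trait in ['collaborative', 'community', 'together']):
--         beliefs.append("Great things happen when we lift each other up")
--
--     if not beliefs:
--         beliefs = ["Quality and integrity should never be compromised", "Every interaction is an opportunity to create value"]
--
--     return ". ".join(beliefs) + "."
-- ===== SOURCE B (Python) =====
-- from typing import Dict, Any, List
--
-- # Inverted index: each keyword maps to the bit of the belief it triggers.
-- _KEYWORD_BIT = {
--     'authentic': 1, 'honest': 1, 'genuine': 1,
--     'innovative': 2, 'creative': 2, 'forward': 2,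
--     'bold': 4, 'confident': 4, 'strong': 4,
--     'collaborative': 8, 'community': 8, 'together': 8,
-- }
--
-- _BELIEFS = [
--     "Authenticity creates deeper connections than perfection",
--     "Innovation flourishes when diverse perspectives collide",
--     "Bold action creates lasting change",
--     "Great things happen when we lift each other up",
-- ]
--
-- _FALLBACK = ["Quality and integrity should never be compromised",
--              "Every interaction is an opportunity to create value"]
--
-- def _generate_brand_beliefs(brand_spec: Dict[str, Any]) -> str:
--     """Generate brand beliefs statement"""
--     personality = brand_spec.get('personality', {})
--     mask = 0
--     for t in personality.get('traits', []):
--         mask |= _KEYWORD_BIT.get(t.lower(), 0)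
--     beliefs = [b for i, b in enumerate(_BELIEFS) if mask >> i & 1]
--     if not beliefs:
--         beliefs = _FALLBACK
--     return ". ".join(beliefs) + "."
-- ===== Notes on version B (the rewrite author's own statement) =====
-- stated objective: alternative
-- what changed: Inverted the matching: instead of testing each of the four keyword groups against the lowered trait list, B folds once over the raw traits accumulating a bitmask via a keyword-to-bit inverted index, then emits the beliefs whose bit is set (fallback pair if the mask is empty).
import Mathlib
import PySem

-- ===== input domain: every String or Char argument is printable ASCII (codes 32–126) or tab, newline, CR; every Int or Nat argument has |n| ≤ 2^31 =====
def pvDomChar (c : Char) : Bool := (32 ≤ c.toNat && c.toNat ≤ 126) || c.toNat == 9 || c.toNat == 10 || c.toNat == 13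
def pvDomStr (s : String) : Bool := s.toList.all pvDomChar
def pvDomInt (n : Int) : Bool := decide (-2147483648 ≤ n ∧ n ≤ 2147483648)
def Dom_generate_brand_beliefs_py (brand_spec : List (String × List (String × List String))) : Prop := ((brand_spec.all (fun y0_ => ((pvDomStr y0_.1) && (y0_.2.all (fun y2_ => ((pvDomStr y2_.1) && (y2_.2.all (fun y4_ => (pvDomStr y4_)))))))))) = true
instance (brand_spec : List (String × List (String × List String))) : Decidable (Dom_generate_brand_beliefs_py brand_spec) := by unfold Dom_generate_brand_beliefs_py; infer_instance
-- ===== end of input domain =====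

-- B inverts A's matching: one fold over the traits accumulates a bitmask via a keyword-to-bit
-- index, then the beliefs whose bit is set are emitted (alternative decomposition, same cost).


-- ===== PORT A =====
def generate_brand_beliefs_py (brand_spec : List (String × List (String × List String))) : String :=
  let personality := (PySem.Dict.mk brand_spec).getD "personality" []
  let traits := ((PySem.Dict.mk personality).getD "traits" []).map PySem.Str.lower
  let beliefs : List String := []
  let beliefs := if ["authentic", "honest", "genuine"].any (fun t => traits.contains t)
    then beliefs ++ ["Authenticity creates deeper connections than perfection"] else beliefs
  let beliefs := if ["innovative", "creative", "forward"].any (fun t => traits.contains t)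
    then beliefs ++ ["Innovation flourishes when diverse perspectives collide"] else beliefs
  let beliefs := if ["bold", "confident", "strong"].any (fun t => traits.contains t)
    then beliefs ++ ["Bold action creates lasting change"] else beliefs
  let beliefs := if ["collaborative", "community", "together"].any (fun t => traits.contains t)
    then beliefs ++ ["Great things happen when we lift each other up"] else beliefs
  let beliefs := if beliefs = [] then
    ["Quality and integrity should never be compromised", "Every interaction is an opportunity to create value"]
    else beliefs
  PySem.Str.join ". " beliefs ++ "."

-- ===== PORT B =====
def pvKwBit : PySem.Dict String Nat :=
  PySem.Dict.mk
    [ ("authentic", 1), ("honest", 1), ("genuine", 1),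
      ("innovative", 2), ("creative", 2), ("forward", 2),
      ("bold", 4), ("confident", 4), ("strong", 4),
      ("collaborative", 8), ("community", 8), ("together", 8) ]

def pvBeliefs : List String :=
  [ "Authenticity creates deeper connections than perfection",
    "Innovation flourishes when diverse perspectives collide",
    "Bold action creates lasting change",
    "Great things happen when we lift each other up" ]

def pvFallback : List String :=
  ["Quality and integrity should never be compromised", "Every interaction is an opportunity to create value"]

def generate_brand_beliefs_py_alt (brand_spec : List (String × List (String × List String))) : String :=
  let personality := (PySem.Dict.mk brand_spec).getD "personality" []
  let mask := ((PySem.Dict.mk personality).getD "traits" []).foldl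
    (fun m t => m ||| pvKwBit.getD (PySem.Str.lower t) 0) 0
  let beliefs := ((PySem.List.enumerate pvBeliefs).filter
    (fun p => (mask >>> p.1.toNat) &&& 1 == 1)).map (·.2)
  let beliefs := if beliefs = [] then pvFallback else beliefs
  PySem.Str.join ". " beliefs ++ "."

-- ===== PRECONDITION & SPEC =====
def Spec_generate_brand_beliefs_py (brand_spec : List (String × List (String × List String))) (out : String) : Prop := out = generate_brand_beliefs_py_alt brand_spec
instance (brand_spec : List (String × List (String × List String))) (out : String) : Decidable (Spec_generate_brand_beliefs_py brand_spec out) := by unfold Spec_generate_brand_beliefs_py; infer_instance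

-- ===== CLAIM (what is proved, stated in full; the proofs are below) =====
def Claim_equal_generate_brand_beliefs_py : Prop := ∀ (brand_spec : List (String × List (String × List String))), Dom_generate_brand_beliefs_py brand_spec → Spec_generate_brand_beliefs_py brand_spec (generate_brand_beliefs_py brand_spec)

-- ===== LEMMAS AND PROOFS =====

-- Python's truthiness test 'mask >> i & 1' equals Nat.testBit
theorem shift_and_one (m i : Nat) : ((m >>> i) &&& 1 == 1) = m.testBit i := by
  rw [Nat.testBit, Nat.and_one_is_mod, Nat.one_and_eq_mod_two]
  rcases Nat.mod_two_eq_zero_or_one (m >>> i) with h | h <;> simp [h]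

-- bit k of the OR-fold over traits is set iff some trait contributes it
theorem testBit_foldl_or (f : String → Nat) (k : Nat) :
    ∀ (ts : List String) (m : Nat),
      (ts.foldl (fun m t => m ||| f t) m).testBit k
        = (m.testBit k || ts.any (fun t => (f t).testBit k)) := by
  intro ts
  induction ts with
  | nil => simp
  | cons t ts ih =>
    intro m
    simp [List.any_cons, ih (m ||| f t), Nat.testBit_or, Bool.or_assoc]

-- bit k of B's inverted index at an arbitrary string = membership in A's k-th keyword group
theorem kwbit (s : String) (k : Nat) (kws : List String)
    (hk : ∀ t ∈ pvKwBit.keys, (pvKwBit.getD t 0).testBit k = kws.contains t)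
    (hsub : ∀ t ∈ kws, t ∈ pvKwBit.keys) (hbit : (0 : Nat).testBit k = false) :
    (pvKwBit.getD s 0).testBit k = kws.contains s := by
  by_cases h : s ∈ pvKwBit.keys
  · exact hk s h
  · have hc : pvKwBit.contains s = false := by
      rw [← Bool.not_eq_true, PySem.Dict.contains_iff_mem_keys]; exact h
    rw [PySem.Dict.getD_of_not_contains pvKwBit 0 hc, hbit]
    have hm : s ∉ kws := fun hm => h (hsub s hm)
    symm
    rw [List.contains_eq_any_beq]
    apply List.any_eq_false.mpr
    intro x hx
    exact (Bool.not_eq_true _).mpr (beq_eq_false_iff_ne.mpr fun (e : s = x) => hm (e ▸ hx))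

theorem kwbit0 (s : String) : (pvKwBit.getD s 0).testBit 0 = (["authentic", "honest", "genuine"] : List String).contains s :=
  kwbit s 0 _ (by intro t ht; fin_cases ht <;> decide) (by intro t ht; fin_cases ht <;> decide) (by decide)

theorem kwbit1 (s : String) : (pvKwBit.getD s 0).testBit 1 = (["innovative", "creative", "forward"] : List String).contains s :=
  kwbit s 1 _ (by intro t ht; fin_cases ht <;> decide) (by intro t ht; fin_cases ht <;> decide) (by decide)

theorem kwbit2 (s : String) : (pvKwBit.getD s 0).testBit 2 = (["bold", "confident", "strong"] : List String).contains s :=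
  kwbit s 2 _ (by intro t ht; fin_cases ht <;> decide) (by intro t ht; fin_cases ht <;> decide) (by decide)

theorem kwbit3 (s : String) : (pvKwBit.getD s 0).testBit 3 = (["collaborative", "community", "together"] : List String).contains s :=
  kwbit s 3 _ (by intro t ht; fin_cases ht <;> decide) (by intro t ht; fin_cases ht <;> decide) (by decide)

-- A's scan of a keyword group against the lowered traits equals the corresponding bit of B's mask
theorem group_eq_bit (kws : List String) (k : Nat)
    (hkw : ∀ s : String, (pvKwBit.getD s 0).testBit k = kws.contains s) (raw : List String) :
    (kws.any (fun t => (raw.map PySem.Str.lower).contains t))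
      = (raw.foldl (fun m t => m ||| pvKwBit.getD (PySem.Str.lower t) 0) 0).testBit k := by
  rw [testBit_foldl_or (fun t => pvKwBit.getD (PySem.Str.lower t) 0) k raw 0]
  simp only [Nat.zero_testBit, Bool.false_or, hkw]
  apply Bool.eq_iff_iff.mpr
  simp only [List.contains_eq_any_beq, List.any_eq_true, List.mem_map, beq_iff_eq]
  aesop

-- ===== VERDICT (by name: the statement is the Claim_ definition above) =====
theorem generate_brand_beliefs_py_spec : Claim_equal_generate_brand_beliefs_py := by
  intro brand_spec _
  unfold Spec_generate_brand_beliefs_py generate_brand_beliefs_py generate_brand_beliefs_py_alt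
  simp only [group_eq_bit _ 0 kwbit0, group_eq_bit _ 1 kwbit1,
             group_eq_bit _ 2 kwbit2, group_eq_bit _ 3 kwbit3,
             pvBeliefs, PySem.List.enumerate_cons, PySem.List.enumerate_nil,
             List.filter_cons, List.filter_nil, shift_and_one]
  norm_num
  generalize (((PySem.Dict.mk ((PySem.Dict.mk brand_spec).getD "personality" [])).getD "traits" []).foldl
      (fun m t => m ||| pvKwBit.getD (PySem.Str.lower t) 0) 0) = mask
  rcases Nat.mod_two_eq_zero_or_one mask with h0 | h0 <;>
    cases h1 : mask.testBit 1 <;> cases h2 : mask.testBit 2 <;> cases h3 : mask.testBit 3 <;>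
      simp [h0, h1, h2, h3, pvFallback]
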